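-- pv_equiv track=rewrite | github.com/dannguyen99/natural_language_processing | problem3/execute.py | build_vocab_with_not
-- ===== SOURCE A (Python) =====
-- import string
--
-- def build_vocab_with_not(texts):
--     """Build vocabulary from dataset
--
--     Args:
--         texts (list): list of tokenized sentences
--
--     Returns:
--         vocab (dict): map from word to index
--     """
--     vocab = {}
--     logical_negation = ["n't", "not", "no", "never"]
--     for s in texts:
--         doc = s.split()
--         for word_index in range(len(doc)):
--             if doc[word_index] in logical_negation:
--                 for after_not_index in range(word_index, len(doc)):
--                     if doc[after_not_index] in string.punctuation:
--                         break
--                     doc[after_not_index] = "NOT_" + doc[after_not_index]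
--             # Check if word is a punctuation
--             if doc[word_index] in string.punctuation:
--                 continue
--             if doc[word_index] not in vocab:
--                 idx = len(vocab)
--                 vocab[doc[word_index]] = idx
--     return vocab
-- ===== SOURCE B (Python) =====
-- import string
--
-- def build_vocab_with_not(texts):
--     """Build vocabulary from dataset (single left-to-right pass with a negation flag)."""
--     vocab = {}
--     logical_negation = ("n't", "not", "no", "never")
--     for s in texts:
--         negated = False
--         for word in s.split():
--             if word in string.punctuation:
--                 negated = False
--                 continue
--             if word in logical_negation:
--                 negated = True
--             if negated:
--                 word = "NOT_" + word
--             if word not in vocab: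
--                 vocab[word] = len(vocab)
--     return vocab
-- ===== Notes on version B (the rewrite author's own statement) =====
-- stated objective: simpler
-- what changed: Replaces A's index-based nested loops with in-place NOT_ rewriting of the token list by a single left-to-right pass per sentence that carries a boolean 'negated' flag (set by a negation trigger, cleared by a punctuation token) and prefixes words on the fly.
import Mathlib
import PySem

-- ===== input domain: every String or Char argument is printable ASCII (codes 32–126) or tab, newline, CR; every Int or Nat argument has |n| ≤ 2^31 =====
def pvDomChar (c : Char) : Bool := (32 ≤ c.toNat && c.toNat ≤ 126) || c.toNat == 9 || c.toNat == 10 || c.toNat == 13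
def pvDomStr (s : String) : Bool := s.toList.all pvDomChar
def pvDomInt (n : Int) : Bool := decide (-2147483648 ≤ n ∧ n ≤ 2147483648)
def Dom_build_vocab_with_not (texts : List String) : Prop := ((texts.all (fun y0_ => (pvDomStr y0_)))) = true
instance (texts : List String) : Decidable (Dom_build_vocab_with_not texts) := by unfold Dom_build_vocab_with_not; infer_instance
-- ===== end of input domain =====

-- B replaces A's nested index loops (in-place "NOT_" rewriting of the token list) with one
-- left-to-right pass per sentence carrying a boolean `negated` flag; same vocab, same order.

-- ===== PORT A =====
-- string.punctuation
def pvPunctuation : String := "!\"#$%&'()*+,-./:;<=>?@[\\]^_`{|}~"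
def pvLogicalNegation : List String := ["n't", "not", "no", "never"]

-- inner loop: `for after_not_index in range(word_index, len(doc)): break on punctuation, else prefix "NOT_"`
def pvInner (doc : List String) (i : Nat) : List String :=
  if i < doc.length then
    if PySem.Str.isIn (doc.getD i "") pvPunctuation then doc
    else pvInner (doc.set i ("NOT_" ++ doc.getD i "")) (i + 1)
  else doc
termination_by doc.length - i
decreasing_by simp only [List.length_set]; omega

-- length is preserved by the inner loop (needed for pvOuter's termination)
theorem pvInner_length (doc : List String) (i : Nat) : (pvInner doc i).length = doc.length := by
  rw [pvInner]
  split
  · split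
    · rfl
    · rw [pvInner_length]; simp
  · rfl
termination_by doc.length - i
decreasing_by simp only [List.length_set]; omega

-- outer loop over `range(len(doc))`, threading the (mutated) doc and the vocab dict
def pvOuter (doc : List String) (i : Nat) (vocab : PySem.Dict String Int) : PySem.Dict String Int :=
  if i < doc.length then
    let doc' := if pvLogicalNegation.contains (doc.getD i "") then pvInner doc i else doc
    let w := doc'.getD i ""
    let vocab' := if PySem.Str.isIn w pvPunctuation then vocab
      else if vocab.contains w then vocab else vocab.insert w (vocab.size : Int)
    pvOuter doc' (i + 1) vocab'
  else vocab
termination_by doc.length - i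
decreasing_by
  rename_i h
  split
  · rw [pvInner_length]; omega
  · omega

def build_vocab_with_not (texts : List String) : List (String × Int) :=
  (texts.foldl (fun vocab s => pvOuter (PySem.Str.split₀ s) 0 vocab) PySem.Dict.empty).items

-- ===== PORT B =====
-- one step of B's single pass: state = (vocab, negated flag)
def pvStep (st : PySem.Dict String Int × Bool) (w : String) : PySem.Dict String Int × Bool :=
  if PySem.Str.isIn w pvPunctuation then (st.1, false)
  else
    let negated := if pvLogicalNegation.contains w then true else st.2
    let w' := if negated then "NOT_" ++ w else w
    (if st.1.contains w' then st.1 else st.1.insert w' (st.1.size : Int), negated)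

def build_vocab_with_not_alt (texts : List String) : List (String × Int) :=
  (texts.foldl (fun vocab s => ((PySem.Str.split₀ s).foldl pvStep (vocab, false)).1)
    PySem.Dict.empty).items

-- ===== PRECONDITION & SPEC =====
def Spec_build_vocab_with_not (texts : List String) (out : List (String × Int)) : Prop := out = build_vocab_with_not_alt texts
instance (texts : List String) (out : List (String × Int)) : Decidable (Spec_build_vocab_with_not texts out) := by unfold Spec_build_vocab_with_not; infer_instance

-- ===== CLAIM (what is proved, stated in full; the proofs are below) =====
def Claim_equal_build_vocab_with_not : Prop := ∀ (texts : List String), Dom_build_vocab_with_not texts → Spec_build_vocab_with_not texts (build_vocab_with_not texts)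

-- ===== LEMMAS AND PROOFS =====

-- the shape of a suffix of doc after A's inner loop ran into it: every word up to the first
-- punctuation token is prefixed with "NOT_"
def pvPfx : List String → List String
  | [] => []
  | w :: ws => if PySem.Str.isIn w pvPunctuation then w :: ws else ("NOT_" ++ w) :: pvPfx ws

theorem pvNOT_not_punct (w : String) : PySem.Str.isIn ("NOT_" ++ w) pvPunctuation = false := by
  rw [show PySem.Str.isIn ("NOT_" ++ w) pvPunctuation
        = PySem.Chars.isIn ("NOT_" ++ w).toList pvPunctuation.toList from by simp]
  rw [PySem.Chars.isIn_eq_false_iff]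
  intro hinf
  have h1 : 'N' ∈ ("NOT_" ++ w).toList := by simp
  have h2 := hinf.subset h1
  revert h2; unfold pvPunctuation; decide

theorem pvNOT_not_neg (w : String) : pvLogicalNegation.contains ("NOT_" ++ w) = false := by
  simp only [pvLogicalNegation, List.contains_cons, List.contains_nil, Bool.or_false,
    Bool.or_eq_false_iff, beq_eq_false_iff_ne, ne_eq]
  refine ⟨?_, ?_, ?_, ?_⟩ <;>
    · intro hh; have := congrArg String.toList hh; simp at this

theorem pvNeg_not_punct (w : String) (h : pvLogicalNegation.contains w = true) :
    PySem.Str.isIn w pvPunctuation = false := by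
  simp only [pvLogicalNegation, List.contains_cons, List.contains_nil, Bool.or_false,
    Bool.or_eq_true, beq_iff_eq] at h
  rcases h with rfl | rfl | rfl | rfl <;> decide

-- entries below the start index are untouched by the inner loop
theorem pvInner_getD_lt (doc : List String) (i j : Nat) (hj : j < i) :
    (pvInner doc i).getD j "" = doc.getD j "" := by
  rw [pvInner]
  split
  · split
    · rfl
    · rw [pvInner_getD_lt _ _ _ (by omega)]
      simp [List.getD_eq_getElem?_getD, List.getElem?_set_ne (by omega : i ≠ j)]
  · rfl
termination_by doc.length - i
decreasing_by simp only [List.length_set]; omega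

-- the suffix from the start index onward becomes pvPfx of the old suffix
theorem pvInner_drop (doc : List String) (i : Nat) :
    (pvInner doc i).drop i = pvPfx (doc.drop i) := by
  rcases Nat.lt_or_ge i doc.length with h | h
  · rw [List.drop_eq_getElem_cons h]
    rw [pvInner]
    rw [if_pos h]
    by_cases hp : PySem.Str.isIn (doc.getD i "") pvPunctuation
    · rw [if_pos hp, pvPfx]
      rw [List.getD_eq_getElem _ _ h] at hp
      rw [if_pos hp, ← List.drop_eq_getElem_cons h]
    · rw [if_neg hp, pvPfx]
      rw [List.getD_eq_getElem _ _ h] at hp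
      rw [if_neg hp]
      have hlen : i < (pvInner (doc.set i ("NOT_" ++ doc.getD i "")) (i + 1)).length := by
        rw [pvInner_length]; simpa using h
      rw [List.drop_eq_getElem_cons hlen]
      congr 1
      · rw [← List.getD_eq_getElem _ "" hlen, pvInner_getD_lt _ _ _ (by omega)]
        rw [List.getD_eq_getElem _ _ (by simpa using h)]
        rw [List.getElem_set_self, List.getD_eq_getElem _ _ h]
      · rw [pvInner_drop]
        congr 1
        simp only [List.drop_set, lt_add_iff_pos_right, Order.lt_one_iff, ↓reduceIte]
  · rw [List.drop_eq_nil_of_le h, pvPfx]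
    rw [pvInner, if_neg (by omega), List.drop_eq_nil_of_le h]
termination_by doc.length - i
decreasing_by simp only [List.length_set]; omega

-- main invariant: A's outer loop from index i, where doc.drop i is the raw suffix ws
-- (flag false) or pvPfx ws (flag true), computes exactly B's flagged fold over ws
theorem pvMain (ws : List String) (b : Bool) (doc : List String) (i : Nat)
    (vocab : PySem.Dict String Int)
    (hdrop : doc.drop i = (if b then pvPfx ws else ws)) :
    pvOuter doc i vocab = (ws.foldl pvStep (vocab, b)).1 := by
  induction ws generalizing b doc i vocab with
  | nil =>
    have hnil : doc.drop i = [] := by cases b <;> simpa [pvPfx] using hdrop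
    rw [pvOuter, if_neg (by have := List.drop_eq_nil_iff.mp hnil; omega)]
    rfl
  | cons w ws ih =>
    have hi : i < doc.length := by
      by_contra hc
      rw [List.drop_eq_nil_of_le (by omega)] at hdrop
      cases b <;> simp [pvPfx] at hdrop <;> split at hdrop <;> simp_all
    have hcons := List.drop_eq_getElem_cons hi
    cases b with
    | false =>
      simp only [Bool.false_eq_true, if_false] at hdrop
      rw [hdrop] at hcons
      obtain ⟨hx0, htail⟩ := List.cons_eq_cons.mp hcons
      have hx : doc.getD i "" = w := by rw [List.getD_eq_getElem _ _ hi, ← hx0]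
      by_cases hneg : pvLogicalNegation.contains w = true
      · have hp := pvNeg_not_punct w hneg
        have hdrop' : (pvInner doc i).drop i = ("NOT_" ++ w) :: pvPfx ws := by
          rw [pvInner_drop, hdrop, pvPfx, if_neg (by simpa using hp)]
        have hlen' : i < (pvInner doc i).length := by rw [pvInner_length]; exact hi
        have hcons' := List.drop_eq_getElem_cons hlen'
        rw [hdrop'] at hcons'
        obtain ⟨hx0', htail'⟩ := List.cons_eq_cons.mp hcons'
        have hx' : (pvInner doc i).getD i "" = "NOT_" ++ w := by
          rw [List.getD_eq_getElem _ _ hlen', ← hx0']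
        rw [pvOuter, if_pos hi, List.foldl_cons]
        simp only [hx, hx', hneg, hp, pvStep, pvNOT_not_punct, Bool.false_eq_true,
          Bool.true_eq_false, if_true, if_false, ite_self]
        exact ih true _ (i + 1) _ (by simpa using htail'.symm)
      · rw [pvOuter, if_pos hi, List.foldl_cons]
        by_cases hp : PySem.Str.isIn w pvPunctuation = true
        · simp only [hx, hneg, hp, pvStep, Bool.false_eq_true, Bool.true_eq_false,
            if_true, if_false, ite_self]
          exact ih false _ (i + 1) _ (by simpa using htail.symm)
        · simp only [hx, hneg, hp, pvStep, Bool.false_eq_true, Bool.true_eq_false,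
            if_true, if_false, ite_self]
          exact ih false _ (i + 1) _ (by simpa using htail.symm)
    | true =>
      simp only [if_true, pvPfx] at hdrop
      by_cases hp : PySem.Str.isIn w pvPunctuation = true
      · rw [if_pos hp] at hdrop
        rw [hdrop] at hcons
        obtain ⟨hx0, htail⟩ := List.cons_eq_cons.mp hcons
        have hx : doc.getD i "" = w := by rw [List.getD_eq_getElem _ _ hi, ← hx0]
        have hneg : pvLogicalNegation.contains w = false := by
          by_contra hc
          have h2 := pvNeg_not_punct w (by simpa using hc)
          rw [hp] at h2; simp at h2
        rw [pvOuter, if_pos hi, List.foldl_cons]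
        simp only [hx, hneg, hp, pvStep, Bool.false_eq_true, Bool.true_eq_false,
          if_true, if_false, ite_self]
        exact ih false _ (i + 1) _ (by simpa using htail.symm)
      · rw [if_neg hp] at hdrop
        rw [hdrop] at hcons
        obtain ⟨hx0, htail⟩ := List.cons_eq_cons.mp hcons
        have hx : doc.getD i "" = "NOT_" ++ w := by rw [List.getD_eq_getElem _ _ hi, ← hx0]
        rw [pvOuter, if_pos hi, List.foldl_cons]
        simp only [hx, hp, pvStep, pvNOT_not_punct, pvNOT_not_neg, Bool.false_eq_true,
          Bool.true_eq_false, if_true, if_false, ite_self]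
        exact ih true _ (i + 1) _ (by simpa using htail.symm)

-- ===== VERDICT (by name: the statement is the Claim_ definition above) =====
theorem build_vocab_with_not_spec : Claim_equal_build_vocab_with_not := by
  intro texts _
  unfold Spec_build_vocab_with_not build_vocab_with_not build_vocab_with_not_alt
  congr 1
  refine List.foldl_ext _ _ _ (fun vocab s _ => ?_)
  exact pvMain (PySem.Str.split₀ s) false _ 0 vocab (by simp)
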